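-- pv_equiv track=rewrite | github.com/titouan-gautier/Polytech | INFO3A - S5/Algo & Prog/TP/tp6/hachage.py | exo01
-- ===== SOURCE A (Python) =====
-- def exo01(d: dict, m: int):
--     res = []
--     collision = 0
--
--     for i in range(m):
--         res.append([])
--
--     for i in d.keys():
--         a = encodage(d[i])
--         b = compresion(a, m)
--
--         if len(res[b]) >= 1:
--             collision += 1
--         res[b].append(d[i])
--
--     return collision,res
--
-- def encodage(s: str) -> int:
--     return int(''.join(str(ord(c)) for c in s))
--
-- def compresion(n: int, m: int) -> int:
--     return n % m
-- ===== SOURCE B (Python) =====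
-- def encodage(s: str) -> int:
--     return int(''.join(str(ord(c)) for c in s))
--
-- def compresion(n: int, m: int) -> int:
--     return n % m
--
-- def exo01(d: dict, m: int):
--     vals = list(d.values())
--     hs = [compresion(encodage(v), m) for v in vals]
--     res = [[v for v, h in zip(vals, hs) if h == i] for i in range(m)]
--     collision = sum(len(b) - 1 for b in res if b)
--     return collision, res
-- ===== Notes on version B (the rewrite author's own statement) =====
-- stated objective: alternative
-- what changed: A makes one element-major pass, mutating res[b] in place and incrementing a collision counter whenever the target bucket is already occupied; B is bucket-major: it precomputes the hash of every value once, then for each bucket index i in range(m) builds the whole bucket as a filtering comprehension over the (value, hash) pairs (m independent scans, no mutation, no counter in the loop), and finally derives collision from the finished table as sum(len(b)-1 for b in res if b).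
import Mathlib
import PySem

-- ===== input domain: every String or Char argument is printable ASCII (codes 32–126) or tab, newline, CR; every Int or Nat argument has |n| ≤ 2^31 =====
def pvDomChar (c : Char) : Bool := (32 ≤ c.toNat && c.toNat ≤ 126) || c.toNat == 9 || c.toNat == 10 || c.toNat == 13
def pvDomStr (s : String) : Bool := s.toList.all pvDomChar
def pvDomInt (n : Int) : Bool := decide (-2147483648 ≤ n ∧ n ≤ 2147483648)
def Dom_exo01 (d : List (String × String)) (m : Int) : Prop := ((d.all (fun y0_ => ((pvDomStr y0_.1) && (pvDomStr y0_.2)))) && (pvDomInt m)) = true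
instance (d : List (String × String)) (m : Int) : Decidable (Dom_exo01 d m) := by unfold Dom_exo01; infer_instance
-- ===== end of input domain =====

-- B builds the table bucket-major (one filtering pass over the values per bucket index, no
-- mutation, no inline counter) and derives collision from the finished bucket sizes
-- (objective: alternative; B does O(n*m) work where A does O(n+m)).

-- ===== PORT A =====
-- shared module helpers (Source A and Source B both define them verbatim)
-- encodage: int(''.join(str(ord(c)) for c in s)); int('') raises ValueError (ofStr? = none there);
-- the total .getD 0 form is exact under Pre_exo01, which excludes empty dict values.
def encodage (s : String) : Int :=
  (PySem.Int.ofStr? (PySem.Str.join "" (s.toList.map (fun c => PySem.Int.toStr (c.toNat : Int))))).getD 0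

-- compresion: n % m; m = 0 raises ZeroDivisionError in Python, excluded by Pre_exo01.
def compresion (n m : Int) : Int := PySem.Int.mod n m

def exo01 (d : List (String × String)) (m : Int) : Int × List (List String) :=
  let dd := PySem.Dict.ofList d
  let res0 : List (List String) :=
    (PySem.List.pyRange 0 m 1).foldl (fun r _ => r ++ [([] : List String)]) []
  dd.keys.foldl
    (fun st i =>
      let a := encodage (dd.getD i "")
      let b := compresion a m
      let bucket := PySem.List.pyGetD st.2 b []
      ((if 1 ≤ bucket.length then st.1 + 1 else st.1),
       PySem.List.pySetD st.2 b (bucket ++ [dd.getD i ""])))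
    ((0 : Int), res0)

-- ===== PORT B =====
def exo01_alt (d : List (String × String)) (m : Int) : Int × List (List String) :=
  let dd := PySem.Dict.ofList d
  let vals : List String := dd.values
  let hs : List Int := vals.map (fun v => compresion (encodage v) m)
  let res : List (List String) :=
    (PySem.List.pyRange 0 m 1).map
      (fun i => ((vals.zip hs).filter (fun p => p.2 == i)).map (fun p => p.1))
  let collision : Int :=
    ((res.filter (fun b => !b.isEmpty)).map (fun b => (b.length : Int) - 1)).sum
  (collision, res)

-- ===== PRECONDITION & SPEC =====
-- Pre_ excludes exactly the inputs where the Python A raises: m ≤ 0 with a non-empty dict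
-- (ZeroDivisionError from n % 0, or IndexError indexing the empty bucket list), and any dict
-- value that is the empty string (int('') raises ValueError).
def Pre_exo01 (d : List (String × String)) (m : Int) : Prop :=
  (d = [] ∨ 1 ≤ m) ∧ ∀ v ∈ (PySem.Dict.ofList d).values, v ≠ ""
instance (d : List (String × String)) (m : Int) : Decidable (Pre_exo01 d m) := by unfold Pre_exo01; infer_instance

def pvWitness_exo01 : (List (String × String)) × Int := ([("a", "x"), ("b", "yz")], 3)

def Spec_exo01 (d : List (String × String)) (m : Int) (out : Int × List (List String)) : Prop := out = exo01_alt d m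
instance (d : List (String × String)) (m : Int) (out : Int × List (List String)) : Decidable (Spec_exo01 d m out) := by unfold Spec_exo01; infer_instance

-- ===== CLAIM (what is proved, stated in full; the proofs are below) =====
def Claim_equal_exo01 : Prop := ∀ (d : List (String × String)) (m : Int), Dom_exo01 d m → Pre_exo01 d m → Spec_exo01 d m (exo01 d m)

-- ===== LEMMAS AND PROOFS =====

-- bucket index of a value (proof-side abbreviation)
def bIdx (m : Int) (v : String) : Int := compresion (encodage v) m

-- A's loop body, acting on the value the key looks up
def stepF (f : String → Int) (st : Int × List (List String)) (v : String) : Int × List (List String) :=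
  ((if 1 ≤ (PySem.List.pyGetD st.2 (f v) []).length then st.1 + 1 else st.1),
   PySem.List.pySetD st.2 (f v) (PySem.List.pyGetD st.2 (f v) [] ++ [v]))

-- number of still-empty buckets of r that vs will hit (an Int-valued 0/1 sum)
def NNf (f : String → Int) (vs : List String) (r : List (List String)) : Int :=
  ((List.range r.length).map
    (fun (j : Nat) => if (r.getD j []).isEmpty && vs.any (fun v => f v == ((j : Nat) : Int)) then (1 : Int) else 0)).sum

lemma getD_set_lt {α : Type} (r : List α) (bn j : Nat) (x : α) (d : α) (hb : bn < r.length) :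
    (r.set bn x).getD j d = if j = bn then x else r.getD j d := by
  rcases eq_or_ne j bn with h | h
  · subst h; simp [List.getD_eq_getElem?_getD, hb]
  · simp [List.getD_eq_getElem?_getD, h, Ne.symm h]

lemma map_range_getD {α : Type} (r : List α) (d : α) :
    (List.range r.length).map (fun (j : Nat) => r.getD j d) = r := by
  apply List.ext_getElem
  · simp
  · intro j h1 h2
    simp [List.getD_eq_getElem?_getD, List.getElem?_eq_getElem h2]

lemma getD_replicate_self {α : Type} (n j : Nat) (a : α) :
    (List.replicate n a).getD j a = a := by
  rw [List.getD_eq_getElem?_getD, List.getElem?_replicate]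
  split <;> rfl

lemma sum_map_range_sub_single (n bn : Nat) (F G : Nat → Int) (δ : Int) (hb : bn < n)
    (hne : ∀ j, j ≠ bn → F j = G j) (heq : F bn = G bn + δ) :
    ((List.range n).map F).sum = ((List.range n).map G).sum + δ := by
  induction n with
  | zero => omega
  | succ k ih =>
    rw [List.range_succ]
    rcases Nat.lt_or_ge bn k with h | h
    · have := ih h
      simp only [List.map_append, List.sum_append, List.map_cons, List.map_nil]
      have hFk : F k = G k := hne k (by omega)
      simp [this, hFk]; ring
    · have hbk : bn = k := by omega
      subst hbk
      have hmap : (List.range bn).map F = (List.range bn).map G := by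
        apply List.map_congr_left
        intro j hj
        exact hne j (by simp at hj; omega)
      simp only [List.map_append, List.sum_append, List.map_cons, List.map_nil]
      simp [hmap, heq]; ring

-- invariant of A's insertion loop: final buckets are initial buckets extended by the filtered
-- values, and the collision count falls short of the value count by the hit empty buckets
lemma loopF (m : Int) (f : String → Int) (hf : ∀ v, 0 ≤ f v ∧ f v < m) (vs : List String) :
    ∀ (r : List (List String)) (c : Int), r.length = m.toNat →
    vs.foldl (stepF f) (c, r) =
      (c + vs.length - NNf f vs r,
       (List.range r.length).map (fun (j : Nat) => r.getD j [] ++ vs.filter (fun v => f v == ((j : Nat) : Int)))) := by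
  induction vs with
  | nil =>
    intro r c hr
    refine Prod.ext ?_ ?_
    · simp [NNf]
    · show r = _
      rw [show (fun (j : Nat) => r.getD j [] ++ List.filter (fun v => f v == ((j : Nat) : Int)) []) = (fun (j : Nat) => r.getD j []) from by funext j; simp]
      exact (map_range_getD r []).symm
  | cons v vs ih =>
    intro r c hr
    obtain ⟨hb0, hblt⟩ := hf v
    set bn := (f v).toNat with hbn
    have hbnr : bn < r.length := by omega
    have hcast : ((bn : Nat) : Int) = f v := by omega
    have hget : PySem.List.pyGetD r (f v) [] = r.getD bn [] := by
      rw [PySem.List.pyGetD_eq_getElem r [] hb0 (by omega)]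
      exact (List.getD_eq_getElem r [] hbnr).symm
    have hstep : stepF f (c, r) v =
        ((if 1 ≤ (r.getD bn []).length then c + 1 else c),
         r.set bn (r.getD bn [] ++ [v])) := by
      rw [stepF]
      rw [show PySem.List.pySetD r (f v) (PySem.List.pyGetD r (f v) [] ++ [v]) = r.set bn (PySem.List.pyGetD r (f v) [] ++ [v]) from PySem.List.pySetD_of_nonneg r _ hb0]
      rw [hget]
    rw [List.foldl_cons, hstep,
        ih (r.set bn (r.getD bn [] ++ [v])) _ (by simpa using hr)]
    set r' := r.set bn (r.getD bn [] ++ [v]) with hr'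
    have hlen' : r'.length = r.length := by simp [hr']
    have hgetD' : ∀ j, r'.getD j [] = if j = bn then r.getD bn [] ++ [v] else r.getD j [] :=
      fun j => getD_set_lt r bn j _ [] hbnr
    refine Prod.ext ?_ ?_
    · show _ = c + ((v :: vs).length : Int) - NNf f (v :: vs) r
      have hNN : NNf f (v :: vs) r = NNf f vs r' +
          (if (r.getD bn []).isEmpty then (1 : Int) else 0) := by
        unfold NNf
        rw [hlen']
        apply sum_map_range_sub_single r.length bn _ _ _ hbnr
        · intro j hj
          rw [hgetD' j, if_neg hj]
          have hne2 : (f v == ((j : Nat) : Int)) = false := by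
            simp only [beq_eq_false_iff_ne, ne_eq]
            intro hc; apply hj; omega
          simp [List.any_cons, hne2]
        · rw [hgetD' bn, if_pos rfl]
          have hself : (f v == ((bn : Nat) : Int)) = true := by simp [hcast]
          simp [List.any_cons, hself]
      rw [hNN]
      by_cases h : (r.getD bn []).isEmpty = true
      · have hnil : r.getD bn [] = [] := List.isEmpty_iff.mp h
        rw [if_pos h, if_neg (by rw [hnil]; simp)]
        simp only [List.length_cons]
        push_cast; ring
      · have h1 : 1 ≤ (r.getD bn []).length := by
          rcases hx : (r.getD bn []) with _ | ⟨a, t⟩ <;> simp_all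
        rw [if_neg h, if_pos h1]
        simp only [List.length_cons]
        push_cast; ring
    · show _ = List.map _ (List.range r.length)
      rw [hlen']
      apply List.map_congr_left
      intro j hj
      rw [hgetD' j]
      rcases eq_or_ne j bn with hje | hje
      · subst hje
        rw [if_pos rfl, List.filter_cons, if_pos (by simp [hcast])]
        simp
      · rw [if_neg hje, List.filter_cons,
            if_neg (by simp only [beq_eq_false_iff_ne, ne_eq, Bool.not_eq_true]
                       intro hc; apply hje; omega)]

lemma res0_eq (m : Int) :
    (PySem.List.pyRange 0 m 1).foldl (fun r _ => r ++ [([] : List String)]) [] =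
      List.replicate m.toNat ([] : List String) := by
  rw [PySem.List.foldl_append_singleton_eq_map (fun _ => ([] : List String))]
  simp [List.map_const', PySem.List.length_pyRange_one]

-- filtering the (value, hash) pairs on the hash and projecting = filtering the values directly
lemma zip_filter_fst (f : String → Int) (i : Int) (vs : List String) :
    (((vs.zip (vs.map f)).filter (fun p => p.2 == i)).map (fun p => p.1)) =
      vs.filter (fun v => f v == i) := by
  induction vs with
  | nil => rfl
  | cons v vs ih =>
    by_cases h : (f v == i) = true
    · simp only [List.map_cons, List.zip_cons_cons, List.filter_cons, h, if_pos, ih]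
    · simp only [List.map_cons, List.zip_cons_cons, List.filter_cons]
      rw [if_neg (by simpa using h), if_neg (by simpa using h), ih]

-- B's aggregation: sum of (len-1) over non-empty buckets = total length - number of non-empty buckets
lemma sum_sub_one (L : List (List String)) :
    ((L.filter (fun b => !b.isEmpty)).map (fun b => (b.length : Int) - 1)).sum =
      (L.map (fun b => (b.length : Int))).sum - (L.countP (fun b => !b.isEmpty) : Int) := by
  induction L with
  | nil => simp
  | cons b L ih =>
    by_cases h : b.isEmpty = true
    · have hnil : b = [] := List.isEmpty_iff.mp h
      subst hnil
      simpa using ih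
    · rw [List.filter_cons, if_pos (by simp [h]), List.map_cons, List.sum_cons, ih,
          List.map_cons, List.sum_cons, List.countP_cons, if_pos (by simp [h])]
      push_cast; ring

-- every value lands in exactly one bucket of range(m), so the filtered lengths sum to |vs|
lemma sum_filter_len (n : Nat) (f : String → Int) (vs : List String)
    (h : ∀ v ∈ vs, 0 ≤ f v ∧ f v < (n : Int)) :
    ((List.range n).map (fun (j : Nat) => ((vs.filter (fun v => f v == ((j : Nat) : Int))).length : Int))).sum
      = (vs.length : Int) := by
  induction vs with
  | nil => simp
  | cons v vs ih =>
    obtain ⟨hb0, hblt⟩ := h v (List.mem_cons_self)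
    have ihh := ih (fun w hw => h w (List.mem_cons_of_mem _ hw))
    set bn := (f v).toNat with hbn
    have hcast : ((bn : Nat) : Int) = f v := by omega
    rw [sum_map_range_sub_single n bn _
        (fun (j : Nat) => ((vs.filter (fun v => f v == ((j : Nat) : Int))).length : Int)) 1
        (by omega) ?_ ?_, ihh]
    · simp
    · intro j hj
      rw [List.filter_cons, if_neg]
      simp only [beq_eq_false_iff_ne, ne_eq, Bool.not_eq_true]
      intro hc; apply hj; omega
    · rw [List.filter_cons, if_pos (by simp [hcast])]
      push_cast; simp

-- a bucket of the table is non-empty iff some value hashes to its index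
lemma countP_nonempty_eq_any (n : Nat) (f : String → Int) (vs : List String) :
    ((List.range n).map (fun (j : Nat) => vs.filter (fun v => f v == ((j : Nat) : Int)))).countP
        (fun b => !b.isEmpty)
      = (List.range n).countP (fun (j : Nat) => vs.any (fun v => f v == ((j : Nat) : Int))) := by
  rw [List.countP_map]
  apply List.countP_congr
  intro j _
  simp [Function.comp, List.filter_eq_nil_iff, List.any_eq_true]

-- the two programs agree on any values list once 1 ≤ m
lemma mainEq (m : Int) (hm : 1 ≤ m) (vs : List String) :
    vs.foldl (stepF (bIdx m)) ((0 : Int), List.replicate m.toNat []) =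
      (let res := (PySem.List.pyRange 0 m 1).map
          (fun i => ((vs.zip (vs.map (fun v => compresion (encodage v) m))).filter
            (fun p => p.2 == i)).map (fun p => p.1));
       (((res.filter (fun b => !b.isEmpty)).map (fun b => (b.length : Int) - 1)).sum, res)) := by
  have hm0 : (0 : Int) < m := by omega
  have hbnd : ∀ v, 0 ≤ bIdx m v ∧ bIdx m v < m := by
    intro v
    constructor
    · unfold bIdx compresion; exact PySem.Int.mod_nonneg _ hm0
    · unfold bIdx compresion; exact PySem.Int.mod_lt _ hm0
  have hlen : (List.replicate m.toNat ([] : List String)).length = m.toNat := by simp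
  rw [loopF m (bIdx m) hbnd vs _ 0 hlen]
  have hres : (PySem.List.pyRange 0 m 1).map
      (fun i => ((vs.zip (vs.map (fun v => compresion (encodage v) m))).filter
        (fun p => p.2 == i)).map (fun p => p.1)) =
      (List.range m.toNat).map (fun (j : Nat) => vs.filter (fun v => bIdx m v == ((j : Nat) : Int))) := by
    rw [PySem.List.pyRange_one, List.map_map, Int.sub_zero]
    apply List.map_congr_left
    intro j _
    simp only [Function.comp_apply, zero_add]
    rw [zip_filter_fst]
    rfl
  dsimp only
  rw [hres]
  refine Prod.ext ?_ ?_
  · -- collision component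
    show (0 : Int) + vs.length - NNf (bIdx m) vs (List.replicate m.toNat []) = _
    have hNN0 : NNf (bIdx m) vs (List.replicate m.toNat []) =
        (((List.range m.toNat).countP (fun (j : Nat) => vs.any (fun v => bIdx m v == ((j : Nat) : Int)))) : Int) := by
      unfold NNf
      rw [hlen]
      rw [show (fun (j : Nat) => if ((List.replicate m.toNat ([] : List String)).getD j []).isEmpty &&
            vs.any (fun v => bIdx m v == ((j : Nat) : Int)) then (1 : Int) else 0) =
          (fun (j : Nat) => if vs.any (fun v => bIdx m v == ((j : Nat) : Int)) then (1 : Int) else 0) from ?_]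
      · exact PySem.List.sum_map_ite_one_zero _ _
      · funext j
        rw [getD_replicate_self]
        simp
    have hbnd2 : ∀ v ∈ vs, 0 ≤ bIdx m v ∧ bIdx m v < ((m.toNat : Nat) : Int) := by
      intro v _
      have := hbnd v
      exact ⟨this.1, by omega⟩
    rw [sum_sub_one, countP_nonempty_eq_any, List.map_map]
    rw [show ((fun b => ((List.length b : Nat) : Int)) ∘
        (fun (j : Nat) => vs.filter (fun v => bIdx m v == ((j : Nat) : Int)))) =
        (fun (j : Nat) => ((vs.filter (fun v => bIdx m v == ((j : Nat) : Int))).length : Int)) from rfl]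
    rw [sum_filter_len m.toNat (bIdx m) vs hbnd2, hNN0]
    ring
  · -- buckets component
    dsimp only
    rw [hlen]
    apply List.map_congr_left
    intro j _
    rw [getD_replicate_self]
    simp

-- ===== VERDICT (by name: the statement is the Claim_ definition above) =====
theorem exo01_spec : Claim_equal_exo01 := by
  intro d m _hdom hpre
  unfold Spec_exo01
  rcases hpre with ⟨hm | hm, _hne⟩
  · -- empty dict: both sides are (0, list of m empty buckets)
    subst hm
    dsimp only [exo01, exo01_alt]
    rw [res0_eq m]
    have hres : (PySem.List.pyRange 0 m 1).map
        (fun i => ((((PySem.Dict.ofList ([] : List (String × String))).values).zip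
            (((PySem.Dict.ofList ([] : List (String × String))).values).map
              (fun v => compresion (encodage v) m))).filter
          (fun p => p.2 == i)).map (fun p => p.1)) =
        List.replicate m.toNat ([] : List String) := by
      rw [show (fun (i : Int) => ((((PySem.Dict.ofList ([] : List (String × String))).values).zip
            (((PySem.Dict.ofList ([] : List (String × String))).values).map
              (fun v => compresion (encodage v) m))).filter
          (fun p => p.2 == i)).map (fun p => p.1)) = (fun _ => ([] : List String)) from
        funext fun i => rfl]
      simp [List.map_const', PySem.List.length_pyRange_one]
    rw [hres]
    refine Prod.ext ?_ rfl
    show (0 : Int) = _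
    rw [show (List.replicate m.toNat ([] : List String)).filter (fun b => !b.isEmpty) = [] from by
      simp]
    rfl
  · -- 1 ≤ m
    have hnd : (PySem.Dict.ofList d).keys.Nodup := PySem.Dict.nodup_keys_ofList d
    have hA : exo01 d m =
        (PySem.Dict.ofList d).values.foldl (stepF (bIdx m)) (0, List.replicate m.toNat []) := by
      unfold exo01
      rw [res0_eq m, PySem.Dict.values_eq_map_keys _ hnd "", List.foldl_map]
      dsimp only [stepF, bIdx]
      rfl
    rw [hA, mainEq m hm]
    rfl
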